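-- pv_equiv track=rewrite | github.com/joshialonzo/code-challenges | code_challenges/strings/number_stream.py | number_stream
-- ===== SOURCE A (Python) =====
-- def number_stream(string):
--
--   # code goes here
--   current_number = None
--   counter = 0
--
--   for letter in string:
--     if current_number is None:
--       current_number = letter
--       counter = 1
--     elif letter == current_number:
--       counter += 1
--       if int(letter) == counter:
--         return True
--     else:
--       current_number = letter
--       counter = 1
--
--   return False
-- ===== SOURCE B (Python) =====
-- def number_stream(string):
--   # code goes here
--   s = string
--   while s:
--     c = s[0]
--     length = 1
--     while length < len(s) and s[length] == c:
--       length += 1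
--     if length >= 2 and c.isdigit() and 2 <= int(c) <= length:
--       return True
--     s = s[length:]
--   return False
-- ===== Notes on version B (the rewrite author's own statement) =====
-- stated objective: alternative
-- what changed: B replaces A's per-character state machine (current char + counter with an equality test at every step) by run extraction: it finds each maximal run of a repeated character and tests the closed condition 2 <= int(c) <= run length, guarded by isdigit so B is total.
-- crash fix: A raises ValueError (int() of a non-digit) on strings containing an adjacent repeated non-digit character with no successful digit run ending before it; B returns False there (or True if a later run matches). — e.g. on number_stream("!!"): A raises ValueError, B returns false
import Mathlib
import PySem

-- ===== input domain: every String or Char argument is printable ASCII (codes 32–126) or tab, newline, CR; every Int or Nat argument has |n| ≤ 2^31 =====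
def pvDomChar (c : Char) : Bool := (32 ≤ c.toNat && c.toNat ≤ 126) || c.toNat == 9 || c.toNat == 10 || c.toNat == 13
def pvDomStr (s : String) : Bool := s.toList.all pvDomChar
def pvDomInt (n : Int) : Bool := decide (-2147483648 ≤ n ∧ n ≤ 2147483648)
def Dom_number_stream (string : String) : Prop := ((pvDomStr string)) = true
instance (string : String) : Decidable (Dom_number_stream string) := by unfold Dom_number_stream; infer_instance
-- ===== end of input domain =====

-- B re-implements the scan as run-extraction (each maximal run, test 2 <= int(c) <= run length, isdigit-guarded)
-- instead of A's per-character state machine; alternative decomposition, same cost; equivalence of return values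
-- on Pre_ (exactly the inputs where A returns; elsewhere A raises ValueError, see Raises_).


-- ===== PORT A =====
-- literal port of A's loop: state = (current_number : Option Char, counter : Int); int(letter) is
-- PySem.Int.ofStr? (none = ValueError, where Python A raises — those inputs are outside Pre_number_stream)
def pvALoop : List Char → Option Char → Int → Bool
  | [], _, _ => false
  | letter :: rest, cur, counter =>
    match cur with
    | none => pvALoop rest (some letter) 1
    | some c =>
      if letter == c then
        match PySem.Int.ofStr? (String.ofList [letter]) with
        | none => false   -- Python raises ValueError here; excluded by Pre_number_stream
        | some d => if d == counter + 1 then true else pvALoop rest (some c) (counter + 1)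
      else pvALoop rest (some letter) 1

def number_stream (string : String) : Bool := pvALoop string.toList none 0

-- ===== PORT B =====
-- inner while of B: how far s[length] == c keeps holding, i.e. the run length of c at the head of the tail
def pvRunLen (c : Char) : List Char → Nat
  | [] => 0
  | x :: xs => if x == c then pvRunLen c xs + 1 else 0

-- outer while of B; each iteration consumes the leading run (length ≥ 1) and continues on s = s[length:],
-- so fuel := initial length bounds the iteration count and the fuel-0 branch is never reached
def pvAltLoop : Nat → List Char → Bool
  | 0, _ => false
  | _ + 1, [] => false
  | fuel + 1, c :: rest =>
    let len : Nat := 1 + pvRunLen c rest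
    -- d = int(c); B evaluates it only under the c.isdigit() guard, where ofStr? is some
    let d : Int := (PySem.Int.ofStr? (String.ofList [c])).getD 0
    if 2 ≤ len ∧ c.isDigit = true ∧ 2 ≤ d ∧ d ≤ (len : Int) then true
    else pvAltLoop fuel ((c :: rest).drop len)

def number_stream_alt (string : String) : Bool := pvAltLoop string.toList.length string.toList

-- ===== PRECONDITION & SPEC =====
-- a "bad pair" at i: two adjacent equal non-digit characters — the point where Python's int() raises ValueError
def pvBad (l : List Char) (i : Nat) : Bool :=
  match l[i]?, l[i + 1]? with
  | some a, some b => a == b && !a.isDigit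
  | _, _ => false

-- a "good window" ending at or before i: d = int(c) ≥ 2 consecutive copies of a digit c — by position i the
-- original loop's counter has already hit int(c) inside that run and returned True
def pvGoodUpto (l : List Char) (i j : Nat) : Bool :=
  match l[j]? with
  | some c =>
      c.isDigit && decide (2 ≤ c.toNat - 48) && decide (j + (c.toNat - 48) ≤ i + 1)
        && decide (∀ k < c.toNat - 48, l[j + k]? = some c)
  | none => false

def pvP (l : List Char) : Prop :=
  ∀ i < l.length, pvBad l i = true → ∃ j ≤ i, pvGoodUpto l i j = true

-- Pre_ excludes exactly the strings on which Python A raises ValueError: those with an adjacent repeated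
-- non-digit pair that is not preceded by a completed successful digit run (no good window ending before it).
def Pre_number_stream (string : String) : Prop := pvP string.toList
instance (string : String) : Decidable (Pre_number_stream string) := by
  unfold Pre_number_stream pvP; infer_instance

def pvWitness_number_stream : String := "a22b"

def Spec_number_stream (string : String) (out : Bool) : Prop := out = number_stream_alt string
instance (string : String) (out : Bool) : Decidable (Spec_number_stream string out) := by
  unfold Spec_number_stream; infer_instance

-- OPTIONAL crash-fix block: on strings with an adjacent repeated non-digit pair not preceded by a completed
-- successful digit run, A raises ValueError; B returns a value (its run test simply fails on non-digit runs).
def Raises_number_stream (string : String) : Prop :=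
  ∃ i < string.toList.length, pvBad string.toList i = true ∧
    ∀ j ≤ i, ¬ pvGoodUpto string.toList i j = true
instance (string : String) : Decidable (Raises_number_stream string) := by
  unfold Raises_number_stream; infer_instance

def pvRaiseWitness_number_stream : String := "!!"
def pvRaiseWitnessOut_number_stream : Bool := false

-- ===== CLAIM (what is proved, stated in full; the proofs are below) =====
def Claim_equal_number_stream : Prop := ∀ (string : String), Dom_number_stream string → Pre_number_stream string → Spec_number_stream string (number_stream string)
def Claim_raises_number_stream : Prop := (∀ (string : String), Dom_number_stream string → Raises_number_stream string → ¬ Pre_number_stream string) ∧ (Dom_number_stream (pvRaiseWitness_number_stream) ∧ Raises_number_stream (pvRaiseWitness_number_stream) ∧ number_stream_alt (pvRaiseWitness_number_stream) = pvRaiseWitnessOut_number_stream)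

-- ===== LEMMAS AND PROOFS =====

theorem pvCharEq (c d : Char) (h : c.toNat = d.toNat) : c = d :=
  Char.ext (UInt32.toNat_inj.mp h)

-- int(c) of a single ASCII digit character
theorem pvOfStr_digit (c : Char) (h : c.isDigit = true) :
    PySem.Int.ofStr? (String.ofList [c]) = some ((c.toNat : Int) - 48) := by
  have hb : 48 ≤ c.toNat ∧ c.toNat ≤ 57 := by
    simp [Char.isDigit] at h
    exact ⟨h.1, h.2⟩
  have h10 : c.toNat = 48 ∨ c.toNat = 49 ∨ c.toNat = 50 ∨ c.toNat = 51 ∨ c.toNat = 52 ∨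
      c.toNat = 53 ∨ c.toNat = 54 ∨ c.toNat = 55 ∨ c.toNat = 56 ∨ c.toNat = 57 := by omega
  rcases h10 with h|h|h|h|h|h|h|h|h|h
  · rw [pvCharEq c '0' (by rw [show Char.toNat '0' = 48 from rfl]; exact h)]; decide
  · rw [pvCharEq c '1' (by rw [show Char.toNat '1' = 49 from rfl]; exact h)]; decide
  · rw [pvCharEq c '2' (by rw [show Char.toNat '2' = 50 from rfl]; exact h)]; decide
  · rw [pvCharEq c '3' (by rw [show Char.toNat '3' = 51 from rfl]; exact h)]; decide
  · rw [pvCharEq c '4' (by rw [show Char.toNat '4' = 52 from rfl]; exact h)]; decide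
  · rw [pvCharEq c '5' (by rw [show Char.toNat '5' = 53 from rfl]; exact h)]; decide
  · rw [pvCharEq c '6' (by rw [show Char.toNat '6' = 54 from rfl]; exact h)]; decide
  · rw [pvCharEq c '7' (by rw [show Char.toNat '7' = 55 from rfl]; exact h)]; decide
  · rw [pvCharEq c '8' (by rw [show Char.toNat '8' = 56 from rfl]; exact h)]; decide
  · rw [pvCharEq c '9' (by rw [show Char.toNat '9' = 57 from rfl]; exact h)]; decide

theorem pvRunLen_split (c : Char) (rest : List Char) :
    List.replicate (pvRunLen c rest) c ++ rest.drop (pvRunLen c rest) = rest := by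
  induction rest with
  | nil => rfl
  | cons x xs ih =>
    by_cases hx : x = c
    · subst hx; simp [pvRunLen, List.replicate_succ, ih]
    · simp [pvRunLen, hx]

theorem pvRunLen_drop_head (c : Char) (rest : List Char) (x : Char)
    (h : (rest.drop (pvRunLen c rest)).head? = some x) : ¬ x = c := by
  induction rest with
  | nil => simp at h
  | cons y ys ih =>
    by_cases hy : y = c
    · subst hy
      rw [show pvRunLen y (y :: ys) = pvRunLen y ys + 1 from by simp [pvRunLen]] at h
      rw [List.drop_succ_cons] at h
      exact ih h
    · simp [pvRunLen, hy] at h; subst h; exact hy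

theorem pvRunLen_pos_head (c : Char) (rest : List Char) (h : 0 < pvRunLen c rest) :
    rest.head? = some c := by
  cases rest with
  | nil => simp [pvRunLen] at h
  | cons y ys =>
    by_cases hy : y = c
    · simp [hy]
    · simp [pvRunLen, hy] at h

-- the head run as replicate: c :: rest = replicate (1 + pvRunLen c rest) c ++ drop
theorem pvHeadRun (c : Char) (rest : List Char) :
    c :: rest = List.replicate (1 + pvRunLen c rest) c ++ rest.drop (pvRunLen c rest) := by
  rw [Nat.add_comm, List.replicate_succ, List.cons_append, pvRunLen_split]

-- getElem? facts through the replicate ++ drop decomposition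
theorem pvGet_run (c : Char) (rest : List Char) (j : Nat) (hj : j < 1 + pvRunLen c rest) :
    (c :: rest)[j]? = some c := by
  rw [pvHeadRun c rest]
  rw [List.getElem?_append_left (by simpa using hj)]
  simp [hj]

theorem pvGet_shift (c : Char) (rest : List Char) (k : Nat) :
    (c :: rest)[1 + pvRunLen c rest + k]? = (rest.drop (pvRunLen c rest))[k]? := by
  rw [pvHeadRun c rest]
  rw [List.getElem?_append_right (by simp)]
  simp

theorem pvGet_after_run (c : Char) (rest : List Char)
    (h : (c :: rest)[1 + pvRunLen c rest]? = some c) : False := by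
  have := pvGet_shift c rest 0
  rw [Nat.add_zero] at this
  rw [this] at h
  rw [← List.head?_eq_getElem?] at h
  exact pvRunLen_drop_head c rest c h rfl

-- pvP survives dropping a head run on which neither program fires
theorem pvP_drop (c : Char) (rest : List Char)
    (hng : ¬ (c.isDigit = true ∧ 2 ≤ c.toNat - 48 ∧ c.toNat - 48 ≤ 1 + pvRunLen c rest))
    (hP : pvP (c :: rest)) : pvP (rest.drop (pvRunLen c rest)) := by
  intro i hi hbad
  set m := pvRunLen c rest with hm
  set L := 1 + m with hL
  set ys := rest.drop m with hys
  have hbadx : pvBad (c :: rest) (L + i) = true := by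
    unfold pvBad at hbad ⊢
    rw [pvGet_shift c rest i, show L + i + 1 = L + (i + 1) from by omega, pvGet_shift c rest (i + 1)]
    exact hbad
  have hlen : L + i < (c :: rest).length := by
    unfold pvBad at hbad
    rcases h1 : ys[i]? with _ | a <;> rw [h1] at hbad
    · simp at hbad
    rcases h2 : ys[i + 1]? with _ | b <;> rw [h2] at hbad
    · simp at hbad
    have : i + 1 < ys.length := by
      by_contra hcon
      rw [List.getElem?_eq_none_iff.mpr (by omega)] at h2
      simp at h2
    have hyl : ys.length = rest.length - m := by simp [hys]
    have hml : m ≤ rest.length := by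
      by_contra hcon
      have : ys = [] := by
        apply List.eq_nil_of_length_eq_zero; omega
      rw [this] at h1; simp at h1
    simp only [List.length_cons]; omega
  obtain ⟨j, hj, hg⟩ := hP (L + i) hlen hbadx
  -- the good window cannot lie in the head run (else the head run would be good, contra hng)
  have hjL : L ≤ j := by
    by_contra hcon
    push Not at hcon
    unfold pvGoodUpto at hg
    rw [pvGet_run c rest j (by omega)] at hg
    simp only [Bool.and_eq_true, decide_eq_true_eq] at hg
    obtain ⟨⟨⟨hdg, hd2⟩, _⟩, hall⟩ := hg
    set d := c.toNat - 48 with hd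
    have hwin : j + d ≤ L := by
      by_contra hcon2
      push Not at hcon2
      have hk : L - j < d := by omega
      have := hall (L - j) hk
      rw [show j + (L - j) = L from by omega] at this
      exact pvGet_after_run c rest this
    exact hng ⟨hdg, hd2, by omega⟩
  refine ⟨j - L, by omega, ?_⟩
  unfold pvGoodUpto at hg ⊢
  rw [show j = L + (j - L) from by omega, pvGet_shift c rest (j - L)] at hg
  rcases hy : ys[j - L]? with _ | a <;> rw [hy] at hg
  · simp at hg
  simp only [Bool.and_eq_true, decide_eq_true_eq] at hg ⊢
  obtain ⟨⟨⟨hdg, hd2⟩, hbound⟩, hall⟩ := hg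
  refine ⟨⟨⟨hdg, hd2⟩, by omega⟩, ?_⟩
  intro k hk
  have := hall k hk
  rw [show L + (j - L) + k = L + (j - L + k) from by omega, pvGet_shift c rest (j - L + k)] at this
  exact this

-- restarting A's loop on a suffix not starting with c
theorem pvALoop_restart (rest' : List Char) (c : Char) (k : Int)
    (hne : ∀ x, rest'.head? = some x → ¬ x = c) :
    pvALoop rest' (some c) k = pvALoop rest' none 0 := by
  cases rest' with
  | nil => rfl
  | cons x t =>
    have hx : ¬ x = c := hne x (by simp)
    simp only [pvALoop]
    rw [if_neg (by simpa using hx)]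

-- A's loop across one maximal run of c (m copies remaining, counter already k)
theorem pvALoop_run (m : Nat) (c : Char) (rest' : List Char) (k : Int)
    (hdig : 0 < m → c.isDigit = true)
    (hne : ∀ x, rest'.head? = some x → ¬ x = c) :
    pvALoop (List.replicate m c ++ rest') (some c) k =
      if c.isDigit = true ∧ k < (c.toNat : Int) - 48 ∧ (c.toNat : Int) - 48 ≤ k + (m : Int) then true
      else pvALoop rest' none 0 := by
  induction m generalizing k with
  | zero =>
    rw [if_neg (by rintro ⟨-, h2, h3⟩; push_cast at h3; omega)]
    simpa using pvALoop_restart rest' c k hne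
  | succ m ih =>
    have hd : c.isDigit = true := hdig (Nat.succ_pos m)
    have step : pvALoop (c :: (List.replicate m c ++ rest')) (some c) k =
        (if ((c.toNat : Int) - 48) == k + 1 then true
         else pvALoop (List.replicate m c ++ rest') (some c) (k + 1)) := by
      simp [pvALoop, pvOfStr_digit c hd]
    rw [List.replicate_succ, List.cons_append, step]
    by_cases he : (c.toNat : Int) - 48 = k + 1
    · rw [if_pos (by simpa using he),
        if_pos ⟨hd, by omega, by push_cast; omega⟩]
    · rw [if_neg (by simpa using he), ih (k + 1) (fun _ => hd)]
      by_cases h1 : c.isDigit = true ∧ k + 1 < (c.toNat : Int) - 48 ∧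
          (c.toNat : Int) - 48 ≤ k + 1 + (m : Int)
      · rw [if_pos h1, if_pos ⟨hd, by omega, by push_cast at h1 ⊢; omega⟩]
      · rw [if_neg h1, if_neg (by
          rintro ⟨h2, h3, h4⟩
          exact h1 ⟨hd, by omega, by push_cast at h4 ⊢; omega⟩)]

theorem pvMain (n : Nat) : ∀ xs : List Char, xs.length ≤ n → pvP xs →
    pvALoop xs none 0 = pvAltLoop n xs := by
  induction n with
  | zero =>
    intro xs hlen _
    have : xs = [] := List.eq_nil_of_length_eq_zero (Nat.le_zero.mp hlen)
    subst this; rfl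
  | succ n ih =>
    intro xs hlen hP
    cases xs with
    | nil => rfl
    | cons c rest =>
      set m := pvRunLen c rest with hm
      have hne : ∀ x, (rest.drop m).head? = some x → ¬ x = c := fun x hx =>
        pvRunLen_drop_head c rest x hx
      -- if the head run repeats a non-digit, pvP is violated at position 0
      have hdig : 0 < m → c.isDigit = true := by
        intro hpos
        by_contra hnd
        have hbad0 : pvBad (c :: rest) 0 = true := by
          unfold pvBad
          have h1 : (c :: rest)[1]? = some c := by
            have := pvRunLen_pos_head c rest hpos
            simpa [List.head?_eq_getElem?] using this
          rw [Bool.not_eq_true] at hnd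
          simp [h1, hnd]
        obtain ⟨j, hj, hg⟩ := hP 0 (by simp) hbad0
        interval_cases j
        unfold pvGoodUpto at hg
        simp only [List.getElem?_cons_zero, Bool.and_eq_true, decide_eq_true_eq] at hg
        exact hnd hg.1.1.1
      have hA : pvALoop (c :: rest) none 0 = pvALoop rest (some c) 1 := by
        simp only [pvALoop]
      rw [hA]
      conv_lhs => rw [← pvRunLen_split c rest]
      rw [pvALoop_run m c (rest.drop m) 1 hdig hne]
      simp only [pvAltLoop]
      have hdrop : (c :: rest).drop (1 + m) = rest.drop m := by
        rw [Nat.add_comm, List.drop_succ_cons]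
      have hrec : ¬ (c.isDigit = true ∧ 2 ≤ c.toNat - 48 ∧ c.toNat - 48 ≤ 1 + m) →
          pvALoop (rest.drop m) none 0 = pvAltLoop n ((c :: rest).drop (1 + m)) := by
        intro hng
        rw [hdrop]
        apply ih
        · simp only [List.length_drop]
          simp only [List.length_cons] at hlen
          omega
        · exact pvP_drop c rest hng hP
      by_cases hdg : c.isDigit = true
      · have h48 : 48 ≤ c.toNat ∧ c.toNat ≤ 57 := by
          simp [Char.isDigit] at hdg
          exact ⟨hdg.1, hdg.2⟩
        rw [pvOfStr_digit c hdg]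
        simp only [Option.getD_some, ← hm]
        by_cases hc : 2 ≤ c.toNat - 48 ∧ c.toNat - 48 ≤ 1 + m
        · rw [if_pos ⟨hdg, by omega, by omega⟩, if_pos ⟨by omega, hdg, by omega, by omega⟩]
        · have hA' : ¬ (c.isDigit = true ∧ 1 < (c.toNat : Int) - 48 ∧
              (c.toNat : Int) - 48 ≤ 1 + (m : Int)) := by
            rintro ⟨-, h2, h3⟩
            exact hc ⟨by omega, by omega⟩
          have hB' : ¬ (2 ≤ 1 + m ∧ c.isDigit = true ∧ 2 ≤ (c.toNat : Int) - 48 ∧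
              (c.toNat : Int) - 48 ≤ ((1 + m : Nat) : Int)) := by
            rintro ⟨-, -, h3, h4⟩
            exact hc ⟨by omega, by omega⟩
          rw [if_neg hA', if_neg hB']
          exact hrec (by rintro ⟨-, h2, h3⟩; exact hc ⟨h2, h3⟩)
      · simp only [← hm]
        have hA' : ¬ (c.isDigit = true ∧ 1 < (c.toNat : Int) - 48 ∧
            (c.toNat : Int) - 48 ≤ 1 + (m : Int)) := by
          rintro ⟨h1, -⟩; exact hdg h1
        have hB' : ¬ (2 ≤ 1 + m ∧ c.isDigit = true ∧
            2 ≤ (PySem.Int.ofStr? (String.ofList [c])).getD 0 ∧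
            (PySem.Int.ofStr? (String.ofList [c])).getD 0 ≤ ((1 + m : Nat) : Int)) := by
          rintro ⟨-, h2, -⟩; exact hdg h2
        rw [if_neg hA', if_neg hB']
        exact hrec (by rintro ⟨h1, -⟩; exact hdg h1)

-- ===== VERDICT (by name: the statement is the Claim_ definition above) =====
theorem number_stream_spec : Claim_equal_number_stream := by
  intro s _ hpre
  unfold Spec_number_stream number_stream number_stream_alt
  exact pvMain s.toList.length s.toList le_rfl hpre

def number_stream_raises : Claim_raises_number_stream := by
  unfold Claim_raises_number_stream
  refine ⟨?_, by decide⟩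
  rintro s _ ⟨i, hi, hbad, hno⟩ hpre
  obtain ⟨j, hj, hg⟩ := hpre i hi hbad
  exact hno j hj hg
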